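-- pv_equiv track=rewrite | github.com/MarcoABarrera/Rubikcube_solver | final_cube_solverBUENOPRUEBA (1).py | cleansolution
-- ===== SOURCE A (Python) =====
-- def cleansolution(solution):
--     cleanedsolution=""
--     prev=solution[0]
--     for current in solution[1:]:
--         if current=="'":
--             cleanedsolution+=prev.lower()
--         elif current=="2":
--             cleanedsolution+=prev
--             cleanedsolution+=prev
--         else:
--             cleanedsolution+=prev
--         prev=current
--     cleanedsolution+=solution[len(solution)-1]
--     cleanedsolution = cleanedsolution.replace("'", "")
--     cleanedsolution = cleanedsolution.replace("2", "")
--     cleanedsolution = cleanedsolution.replace(" ", "")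
--
--     return cleanedsolution
-- ===== SOURCE B (Python) =====
-- def cleansolution(solution):
--     # Single forward pass: each non-marker char is emitted according to the
--     # marker (if any) that immediately follows it; marker chars are skipped,
--     # so A's three .replace passes disappear.
--     out = []
--     n = len(solution)
--     for i, ch in enumerate(solution):
--         if ch == "'" or ch == "2" or ch == " ":
--             continue
--         nxt = solution[i + 1] if i + 1 < n else ""
--         if nxt == "'":
--             out.append(ch.lower())
--         elif nxt == "2":
--             out.append(ch + ch)
--         else:
--             out.append(ch)
--     return "".join(out)
-- ===== Notes on version B (the rewrite author's own statement) =====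
-- stated objective: simpler
-- what changed: B replaces A's prev-accumulator loop plus three subsequent .replace passes by one forward pass that skips marker characters and emits each kept character according to the marker immediately after it.
import Mathlib
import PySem

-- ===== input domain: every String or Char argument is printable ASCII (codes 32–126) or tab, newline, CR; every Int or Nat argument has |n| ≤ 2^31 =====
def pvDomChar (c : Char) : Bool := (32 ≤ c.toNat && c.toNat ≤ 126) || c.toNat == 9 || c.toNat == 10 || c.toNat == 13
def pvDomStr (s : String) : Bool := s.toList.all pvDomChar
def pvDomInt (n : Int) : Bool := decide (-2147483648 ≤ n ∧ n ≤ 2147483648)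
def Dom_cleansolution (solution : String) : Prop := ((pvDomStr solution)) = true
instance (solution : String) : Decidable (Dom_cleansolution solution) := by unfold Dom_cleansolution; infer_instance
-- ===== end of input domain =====

-- ===== PORT A =====
-- B (objective: simpler): one forward pass that skips marker chars and emits each kept char by the marker right after it, replacing A's prev-accumulator loop plus three .replace passes.
-- loop body of A's for-loop (state = (cleanedsolution, prev))
def stepA (st : List Char × Char) (current : Char) : List Char × Char :=
  if current = '\'' then (st.1 ++ [PySem.Chars.lowerChar st.2], current)
  else if current = '2' then (st.1 ++ [st.2, st.2], current)
  else (st.1 ++ [st.2], current)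

def cleansolution (solution : String) : String :=
  match solution.toList with
  | [] => ""   -- Python raises IndexError here (solution[0]); excluded by Pre_
  | p :: rest =>
    let st := rest.foldl stepA ([], p)
    let cleaned := st.1 ++ [(p :: rest).getLast (by simp)]  -- += solution[len(solution)-1]
    let cleaned := PySem.Chars.replace cleaned ['\''] []
    let cleaned := PySem.Chars.replace cleaned ['2'] []
    let cleaned := PySem.Chars.replace cleaned [' '] []
    String.ofList cleaned

-- ===== PORT B =====
-- B: single pass; each kept char is emitted according to the marker (if any) right after it.
def altGo : List Char → List Char
  | [] => []
  | c :: rest =>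
    if c = '\'' ∨ c = '2' ∨ c = ' ' then altGo rest
    else
      (match rest with
       | [] => [c]
       | nxt :: _ =>
         if nxt = '\'' then [PySem.Chars.lowerChar c]
         else if nxt = '2' then [c, c]
         else [c]) ++ altGo rest

def cleansolution_alt (solution : String) : String := String.ofList (altGo solution.toList)

-- ===== PRECONDITION & SPEC =====
-- Pre_ excludes only the empty string, on which A raises IndexError at solution[0].
def Pre_cleansolution (solution : String) : Prop := solution ≠ ""
instance (solution : String) : Decidable (Pre_cleansolution solution) := by unfold Pre_cleansolution; infer_instance
def pvWitness_cleansolution : String := "R U' R2 F"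

def Spec_cleansolution (solution : String) (out : String) : Prop := out = cleansolution_alt solution
instance (solution : String) (out : String) : Decidable (Spec_cleansolution solution out) := by unfold Spec_cleansolution; infer_instance

-- ===== CLAIM (what is proved, stated in full; the proofs are below) =====
def Claim_equal_cleansolution : Prop := ∀ (solution : String), Dom_cleansolution solution → Pre_cleansolution solution → Spec_cleansolution solution (cleansolution solution)

-- ===== LEMMAS AND PROOFS =====

def pvIsMarker (c : Char) : Bool := c = '\'' || c = '2' || c = ' '

-- per-character transform of A's loop (what A appends for pair (prev, current))
def pvTA (p c : Char) : List Char :=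
  if c = '\'' then [PySem.Chars.lowerChar p]
  else if c = '2' then [p, p] else [p]

def pvChain : Char → List Char → List Char
  | _, [] => []
  | p, c :: rest => pvTA p c ++ pvChain c rest

theorem pvFoldA : ∀ (rest : List Char) (p : Char) (acc : List Char),
    rest.foldl stepA (acc, p) = (acc ++ pvChain p rest, (p :: rest).getLast (by simp)) := by
  intro rest
  induction rest with
  | nil => intro p acc; simp [pvChain]
  | cons c rest ih =>
    intro p acc
    simp only [List.foldl_cons, stepA, pvChain, pvTA]
    rw [List.getLast_cons (by simp)]
    split_ifs with h1 h2 <;> simp [h1, ih, List.append_assoc]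

theorem pvGoFilter (o : Char) : ∀ (l acc : List Char) (fuel : Nat), l.length ≤ fuel →
    PySem.Chars.replace.go [o] [] fuel l acc = acc.reverse ++ l.filter (· ≠ o) := by
  intro l
  induction l with
  | nil => intro acc fuel h; cases fuel <;> simp [PySem.Chars.replace.go]
  | cons c t ih =>
    intro acc fuel h
    cases fuel with
    | zero => simp at h
    | succ f =>
      simp only [PySem.Chars.replace.go, List.isPrefixOf]
      by_cases hc : o = c
      · subst hc; simp [ih acc f (by simpa using h)]
      · simp [hc, Ne.symm hc, ih (c :: acc) f (by simpa using h)]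

theorem pvReplaceSingleEmpty (o : Char) (cs : List Char) :
    PySem.Chars.replace cs [o] [] = cs.filter (· ≠ o) := by
  simp [PySem.Chars.replace, pvGoFilter o cs [] cs.length le_rfl]

theorem pvTripleFilter (cs : List Char) :
    ((cs.filter (· ≠ '\'')).filter (· ≠ '2')).filter (· ≠ ' ')
      = cs.filter (fun c => !pvIsMarker c) := by
  simp only [List.filter_filter]
  apply List.filter_congr
  intro c _
  by_cases h1 : c = '\'' <;> by_cases h2 : c = '2' <;> by_cases h3 : c = ' ' <;>
    simp [pvIsMarker, h1, h2, h3]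

theorem pvLowerMarker (c : Char) : pvIsMarker (PySem.Chars.lowerChar c) = pvIsMarker c := by
  unfold PySem.Chars.lowerChar
  split_ifs with h
  · unfold PySem.Chars.isupper at h
    simp only [Bool.and_eq_true, decide_eq_true_eq, Char.le_def] at h
    have h1 : 65 ≤ c.toNat := h.1
    have h2 : c.toNat ≤ 90 := h.2
    have hv : (c.toNat + 32).isValidChar := by left; omega
    have hval : (Char.ofNat (c.toNat + 32)).toNat = c.toNat + 32 := by
      rw [Char.toNat_ofNat, if_pos hv]
    have e1 : Char.ofNat (c.toNat + 32) ≠ '\'' := by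
      intro he; rw [he] at hval
      have : ('\'' : Char).toNat = 39 := rfl
      omega
    have e2 : Char.ofNat (c.toNat + 32) ≠ '2' := by
      intro he; rw [he] at hval
      have : ('2' : Char).toNat = 50 := rfl
      omega
    have e3 : Char.ofNat (c.toNat + 32) ≠ ' ' := by
      intro he; rw [he] at hval
      have : (' ' : Char).toNat = 32 := rfl
      omega
    have f1 : c ≠ '\'' := by intro he; rw [he] at h1; have : ('\'' : Char).toNat = 39 := rfl; omega
    have f2 : c ≠ '2' := by intro he; rw [he] at h1; have : ('2' : Char).toNat = 50 := rfl; omega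
    have f3 : c ≠ ' ' := by intro he; rw [he] at h1; have : (' ' : Char).toNat = 32 := rfl; omega
    simp [pvIsMarker, e1, e2, e3, f1, f2, f3]
  · rfl

theorem pvMain : ∀ (rest : List Char) (p : Char),
    (pvChain p rest ++ [(p :: rest).getLast (by simp)]).filter (fun c => !pvIsMarker c)
      = altGo (p :: rest) := by
  intro rest
  induction rest with
  | nil =>
    intro p
    simp only [pvChain, List.nil_append, List.getLast_singleton, altGo]
    by_cases hp : pvIsMarker p
    · rw [if_pos (by simpa [pvIsMarker, or_assoc] using hp)]
      simp [hp]
    · rw [if_neg (by simpa [pvIsMarker, or_assoc, not_or] using hp)]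
      simp [hp]
  | cons c rest ih =>
    intro p
    rw [List.getLast_cons (by simp)]
    simp only [pvChain]
    rw [List.append_assoc, List.filter_append, ih c]
    have hkey : (pvTA p c).filter (fun x => !pvIsMarker x)
        = if pvIsMarker p then ([] : List Char)
          else (if c = '\'' then [PySem.Chars.lowerChar p]
                else if c = '2' then [p, p] else [p]) := by
      unfold pvTA
      split_ifs with h1 h2 <;> cases hm : pvIsMarker p <;>
        simp_all [List.filter, pvLowerMarker]
    rw [hkey]
    by_cases hp : pvIsMarker p
    · rw [if_pos hp]
      conv_rhs => rw [altGo]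
      rw [if_pos (by simpa [pvIsMarker, or_assoc] using hp)]
      simp
    · rw [if_neg hp]
      have hnp : ¬(p = '\'' ∨ p = '2' ∨ p = ' ') := by
        simp only [pvIsMarker, Bool.or_eq_true, decide_eq_true_eq] at hp
        tauto
      conv_rhs => rw [altGo]
      rw [if_neg hnp]

-- ===== VERDICT (by name: the statement is the Claim_ definition above) =====
theorem cleansolution_spec : Claim_equal_cleansolution := by
  intro solution _ hpre
  unfold Spec_cleansolution cleansolution cleansolution_alt
  cases hs : solution.toList with
  | nil =>
    exact absurd (String.toList_eq_nil_iff.mp hs) hpre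
  | cons p rest =>
    simp only [pvFoldA rest p []]
    rw [pvReplaceSingleEmpty, pvReplaceSingleEmpty, pvReplaceSingleEmpty, pvTripleFilter]
    rw [List.nil_append, pvMain rest p]
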